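-- pv_equiv track=rewrite | github.com/jramaswami/Binary_Search_Python | fruit_basket_packing.py | solve
-- ===== SOURCE A (Python) =====
-- from collections import namedtuple
--
-- Fruit = namedtuple('Fruit', ['basket_remainder', 'cost_to_fill', 'can_fill', 'index'])
--
-- def solve(fruits, k, size):
--     fruits0 = []
--
--     for i, (fruit_cost, fruit_size, fruit_total) in enumerate(fruits):
--         # The fruit must fit in the basket.
--         if fruit_size > size:
--             continue
--         num_to_fill, remainder = divmod(size, fruit_size)
--         cost_to_fill = fruit_cost * num_to_fill
--         can_fill, remaining_fruits = divmod(fruit_total, num_to_fill)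
--         # To minimizer remainder first, then cost.
--         fruits0.append(Fruit(remainder, cost_to_fill, can_fill, i))
--         # Now add the remaining fruits.
--         fruits0.append(Fruit(size - (remaining_fruits * fruit_size), remaining_fruits * fruit_cost, 1, i))
--
--     fruits0.sort()
--     total_cost = 0
--     for _, cost_to_fill, can_fill, i in fruits0:
--         baskets_to_fill = min(can_fill, k)
--         total_cost += cost_to_fill * baskets_to_fill
--         k = k - baskets_to_fill
--         if k <= 0:
--             break
--
--     return total_cost
-- ===== SOURCE B (Python) =====
-- def solve(fruits, k, size):
--     def entries(i, fruit):
--         fruit_cost, fruit_size, fruit_total = fruit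
--         if fruit_size > size:
--             return []
--         num_to_fill, remainder = divmod(size, fruit_size)
--         can_fill, remaining_fruits = divmod(fruit_total, num_to_fill)
--         return [(remainder, fruit_cost * num_to_fill, can_fill, i),
--                 (size - remaining_fruits * fruit_size, remaining_fruits * fruit_cost, 1, i)]
--
--     items = [e for i, f in enumerate(fruits) for e in entries(i, f)]
--
--     total_cost = 0
--     # priority extraction: repeatedly take the smallest remaining tuple
--     while items:
--         m = min(items)
--         items.remove(m)
--         _, cost_to_fill, can_fill, _ = m
--         baskets_to_fill = min(can_fill, k)
--         total_cost += cost_to_fill * baskets_to_fill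
--         k -= baskets_to_fill
--         if k <= 0:
--             break
--     return total_cost
-- ===== Notes on version B (the rewrite author's own statement) =====
-- stated objective: alternative
-- what changed: B builds the candidate tuples with a flat comprehension and replaces A's full sort followed by a break-loop with repeated priority extraction (take the minimum remaining tuple, remove it, consume baskets), stopping as soon as k is exhausted.
import Mathlib
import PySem

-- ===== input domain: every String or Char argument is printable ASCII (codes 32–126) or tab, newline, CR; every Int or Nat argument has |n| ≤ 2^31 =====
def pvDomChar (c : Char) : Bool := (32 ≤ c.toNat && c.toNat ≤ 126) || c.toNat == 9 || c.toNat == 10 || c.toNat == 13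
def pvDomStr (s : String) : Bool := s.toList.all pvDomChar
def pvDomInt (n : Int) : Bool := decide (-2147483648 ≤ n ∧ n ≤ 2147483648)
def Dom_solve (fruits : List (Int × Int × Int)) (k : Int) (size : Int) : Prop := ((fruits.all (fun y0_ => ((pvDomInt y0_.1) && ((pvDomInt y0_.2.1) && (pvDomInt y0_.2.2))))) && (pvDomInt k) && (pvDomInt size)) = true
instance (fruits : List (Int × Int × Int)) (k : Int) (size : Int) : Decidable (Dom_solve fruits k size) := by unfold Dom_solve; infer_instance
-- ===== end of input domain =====

-- B replaces A's full sort + break-loop by repeated priority extraction (min + remove), stopping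
-- once k baskets are filled; the candidate tuples are built by a flat comprehension instead of
-- a loop with two appends.  Objective: alternative (same results, different algorithm).
-- B mutates only its local list, A mutates none of its arguments.

-- ===== PORT A =====
-- Python compares 4-tuples of ints lexicographically; this key maps a tuple into Mathlib's
-- lexicographic order on nested pairs (exact for tuple '<' / sort / min).
def pvKey (x : Int × Int × Int × Int) : Lex (Int × Lex (Int × Lex (Int × Int))) :=
  toLex (x.1, toLex (x.2.1, toLex (x.2.2.1, x.2.2.2)))

-- the 'for _, cost_to_fill, can_fill, i in fruits0: …' loop with its break
def solveLoopA : List (Int × Int × Int × Int) → Int → Int → Int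
  | [], _, total => total
  | f :: rest, k, total =>
    let baskets := min f.2.2.1 k
    let total' := total + f.2.1 * baskets
    let k' := k - baskets
    if k' ≤ 0 then total' else solveLoopA rest k' total'

def solve (fruits : List (Int × Int × Int)) (k : Int) (size : Int) : Int :=
  -- PySem.Int.floordiv/mod are Python's divmod; Pre_solve excludes the ZeroDivisionError inputs
  let fruits0 := (PySem.List.enumerate fruits).foldl (fun acc p =>
    if p.2.2.1 > size then acc
    else
      let num_to_fill := PySem.Int.floordiv size p.2.2.1
      let remainder := PySem.Int.mod size p.2.2.1
      let cost_to_fill := p.2.1 * num_to_fill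
      let can_fill := PySem.Int.floordiv p.2.2.2 num_to_fill
      let remaining := PySem.Int.mod p.2.2.2 num_to_fill
      acc ++ [(remainder, cost_to_fill, can_fill, p.1)]
          ++ [(size - remaining * p.2.2.1, remaining * p.2.1, (1 : Int), p.1)]) []
  solveLoopA (PySem.List.sorted fruits0 pvKey) k 0

-- ===== PORT B =====
def solveEntries (size : Int) (i : Int) (f : Int × Int × Int) : List (Int × Int × Int × Int) :=
  if f.2.1 > size then []
  else
    let num_to_fill := PySem.Int.floordiv size f.2.1
    let remainder := PySem.Int.mod size f.2.1
    let can_fill := PySem.Int.floordiv f.2.2 num_to_fill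
    let remaining := PySem.Int.mod f.2.2 num_to_fill
    [(remainder, f.1 * num_to_fill, can_fill, i),
     (size - remaining * f.2.1, remaining * f.1, (1 : Int), i)]

-- 'while items: m = min(items); items.remove(m); …'; fuel = initial length is a totality guard
-- (each pass removes one element), and the 'none'/getD branches are unreachable guards.
def solveLoopB : Nat → List (Int × Int × Int × Int) → Int → Int → Int
  | 0, _, _, total => total
  | fuel + 1, items, k, total =>
    match PySem.List.min? items pvKey with
    | none => total
    | some m =>
      let rest := (PySem.List.remove? items m).getD []
      let baskets := min m.2.2.1 k
      let total' := total + m.2.1 * baskets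
      let k' := k - baskets
      if k' ≤ 0 then total' else solveLoopB fuel rest k' total'

def solve_alt (fruits : List (Int × Int × Int)) (k : Int) (size : Int) : Int :=
  let items := (PySem.List.enumerate fruits).flatMap (fun p => solveEntries size p.1 p.2)
  solveLoopB items.length items k 0

-- ===== PRECONDITION & SPEC =====
-- Pre_ excludes exactly the inputs where the Python A raises ZeroDivisionError:
-- a fruit that fits (fruit_size ≤ size) with fruit_size = 0, or with size // fruit_size = 0.
def Pre_solve (fruits : List (Int × Int × Int)) (k : Int) (size : Int) : Prop :=
  ∀ f ∈ fruits, f.2.1 ≤ size → f.2.1 ≠ 0 ∧ PySem.Int.floordiv size f.2.1 ≠ 0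
instance (fruits : List (Int × Int × Int)) (k : Int) (size : Int) : Decidable (Pre_solve fruits k size) := by unfold Pre_solve; infer_instance

def pvWitness_solve : (List (Int × Int × Int)) × Int × Int := ([(3, 2, 7), (1, 5, 4)], 3, 6)

def Spec_solve (fruits : List (Int × Int × Int)) (k : Int) (size : Int) (out : Int) : Prop := out = solve_alt fruits k size
instance (fruits : List (Int × Int × Int)) (k : Int) (size : Int) (out : Int) : Decidable (Spec_solve fruits k size out) := by unfold Spec_solve; infer_instance

-- ===== CLAIM (what is proved, stated in full; the proofs are below) =====
def Claim_equal_solve : Prop := ∀ (fruits : List (Int × Int × Int)) (k : Int) (size : Int), Dom_solve fruits k size → Pre_solve fruits k size → Spec_solve fruits k size (solve fruits k size)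

-- ===== LEMMAS AND PROOFS =====

theorem pvKey_injective : Function.Injective pvKey := by
  rintro ⟨a1, a2, a3, a4⟩ ⟨b1, b2, b3, b4⟩ h
  simp only [pvKey, toLex_inj, Prod.mk.injEq] at h
  simp_all

-- the two builds produce the same candidate list
theorem build_eq (fruits : List (Int × Int × Int)) (size : Int) :
    ((PySem.List.enumerate fruits).foldl (fun acc p =>
      if p.2.2.1 > size then acc
      else
        let num_to_fill := PySem.Int.floordiv size p.2.2.1
        let remainder := PySem.Int.mod size p.2.2.1
        let cost_to_fill := p.2.1 * num_to_fill
        let can_fill := PySem.Int.floordiv p.2.2.2 num_to_fill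
        let remaining := PySem.Int.mod p.2.2.2 num_to_fill
        acc ++ [(remainder, cost_to_fill, can_fill, p.1)]
            ++ [(size - remaining * p.2.2.1, remaining * p.2.1, (1 : Int), p.1)]) [])
    = (PySem.List.enumerate fruits).flatMap (fun p => solveEntries size p.1 p.2) := by
  have hfun : (fun (acc : List (Int × Int × Int × Int)) (p : Int × (Int × Int × Int)) =>
      if p.2.2.1 > size then acc
      else
        acc ++ [(PySem.Int.mod size p.2.2.1, p.2.1 * PySem.Int.floordiv size p.2.2.1,
                 PySem.Int.floordiv p.2.2.2 (PySem.Int.floordiv size p.2.2.1), p.1)]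
            ++ [(size - PySem.Int.mod p.2.2.2 (PySem.Int.floordiv size p.2.2.1) * p.2.2.1,
                 PySem.Int.mod p.2.2.2 (PySem.Int.floordiv size p.2.2.1) * p.2.1, (1 : Int), p.1)])
      = fun acc p => acc ++ solveEntries size p.1 p.2 := by
    funext acc p
    simp only [solveEntries]
    split_ifs <;> simp
  simp only [hfun]
  simpa using PySem.List.foldl_append_eq_flatMap (fun p => solveEntries size p.1 p.2) (PySem.List.enumerate fruits) []

-- extracting the first minimum is taking the head of the stable sort
theorem sorted_min_cons (items : List (Int × Int × Int × Int)) (m : Int × Int × Int × Int)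
    (hm : PySem.List.min? items pvKey = some m) :
    PySem.List.sorted items pvKey = m :: PySem.List.sorted (items.erase m) pvKey := by
  have hmem : m ∈ items := PySem.List.min?_mem hm
  have hmin := PySem.List.min?_isMin hm
  apply List.Perm.eq_of_pairwise (le := fun a b => pvKey a ≤ pvKey b)
  · intro a b _ _ h1 h2
    exact pvKey_injective (le_antisymm h1 h2)
  · exact PySem.List.sorted_pairwise items pvKey
  · refine List.Pairwise.cons ?_ (PySem.List.sorted_pairwise _ pvKey)
    intro y hy
    have : y ∈ items := List.mem_of_mem_erase ((PySem.List.mem_sorted _ _ _ _).1 hy)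
    exact hmin y this
  · have p1 := PySem.List.sorted_perm items pvKey false
    have p2 := List.perm_cons_erase hmem
    have p3 := PySem.List.sorted_perm (items.erase m) pvKey false
    exact (p1.trans p2).trans (List.Perm.cons m p3.symm)

-- the extraction loop computes A's loop over the sorted list
theorem loop_eq (fuel : Nat) (items : List (Int × Int × Int × Int)) (k total : Int)
    (hfuel : items.length ≤ fuel) :
    solveLoopB fuel items k total = solveLoopA (PySem.List.sorted items pvKey) k total := by
  induction fuel generalizing items k total with
  | zero =>
    have : items = [] := List.length_eq_zero_iff.1 (Nat.le_zero.1 hfuel)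
    subst this
    simp [solveLoopB, solveLoopA, PySem.List.sorted]
  | succ fuel ih =>
    cases hit : PySem.List.min? items pvKey with
    | none =>
      have : items = [] := (PySem.List.min?_eq_none_iff items pvKey).1 hit
      subst this
      simp [solveLoopB, hit, solveLoopA, PySem.List.sorted]
    | some m =>
      have hmem : m ∈ items := PySem.List.min?_mem hit
      have hrem := PySem.List.remove?_eq_some_erase items m hmem
      have hlen : (items.erase m).length ≤ fuel := by
        have := List.length_erase_of_mem hmem
        omega
      rw [sorted_min_cons items m hit]
      simp only [solveLoopB, hit, hrem, Option.getD_some, solveLoopA]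
      split_ifs with h
      · rfl
      · exact ih _ _ _ hlen

-- ===== VERDICT (by name: the statement is the Claim_ definition above) =====
theorem solve_spec : Claim_equal_solve := by
  intro fruits k size _ _
  unfold Spec_solve solve solve_alt
  rw [build_eq]
  exact (loop_eq _ _ k 0 le_rfl).symm
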